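-- pv_equiv track=rewrite | github.com/TomAmirault/detection-notes | src/utils/text_utils.py | _max_consecutive_run
-- ===== SOURCE A (Python) =====
-- def _max_consecutive_run(tokens: list[str]) -> int:
--     """
--     Find the maximum consecutive repetition count for any token in a sequence.
--
--     Args:
--         tokens: List of tokens to analyze.
--
--     Returns:
--         Maximum number of consecutive repetitions of any single token.
--     """
--     max_run, cur, prev = 1, 1, None
--     for t in tokens:
--         if t == prev:
--             cur += 1
--             if cur > max_run:
--                 max_run = cur
--         else:
--             cur = 1
--             prev = t
--     return max_run
-- ===== SOURCE B (Python) =====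
-- from itertools import groupby
--
--
-- def _max_consecutive_run(tokens: list[str]) -> int:
--     lens = [sum(1 for _ in group) for _, group in groupby(tokens)]
--     return max(lens, default=1)
-- ===== Notes on version B (the rewrite author's own statement) =====
-- stated objective: idiomatic
-- what changed: Replaces the inline running-counter/prev-tracking loop with a two-phase formulation: itertools.groupby splits the sequence into maximal runs of equal adjacent tokens, and the result is max of the run lengths with default=1 for empty input.
import Mathlib
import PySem

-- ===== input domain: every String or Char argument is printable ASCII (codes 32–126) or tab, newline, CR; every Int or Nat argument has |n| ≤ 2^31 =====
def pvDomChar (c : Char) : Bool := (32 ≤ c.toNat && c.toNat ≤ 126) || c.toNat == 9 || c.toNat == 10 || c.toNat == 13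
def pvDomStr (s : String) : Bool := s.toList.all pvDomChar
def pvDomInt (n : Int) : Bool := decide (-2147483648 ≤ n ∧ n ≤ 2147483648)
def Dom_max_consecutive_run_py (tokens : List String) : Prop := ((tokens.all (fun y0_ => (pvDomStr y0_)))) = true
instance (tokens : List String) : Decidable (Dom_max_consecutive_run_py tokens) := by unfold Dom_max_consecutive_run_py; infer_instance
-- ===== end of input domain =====

-- B groups the tokens into maximal runs of equal adjacent tokens (itertools.groupby) and returns the max run length, default 1.

-- ===== PORT A =====
-- A's for-loop over tokens with state (max_run, cur, prev); prev starts as None.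
def pvLoopA : List String → Int → Int → Option String → Int
  | [], max_run, _, _ => max_run
  | t :: rest, max_run, cur, prev =>
    if some t == prev then
      let cur' := cur + 1
      let max_run' := if cur' > max_run then cur' else max_run
      pvLoopA rest max_run' cur' prev
    else
      pvLoopA rest max_run 1 (some t)

def max_consecutive_run_py (tokens : List String) : Int :=
  pvLoopA tokens 1 1 none

-- ===== PORT B =====
-- groupby helper: consume the maximal leading run equal to t, returning (extra count, rest).
def pvTakeRun (t : String) : List String → Nat × List String
  | [] => (0, [])
  | x :: xs =>
    if x == t then
      ((pvTakeRun t xs).1 + 1, (pvTakeRun t xs).2)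
    else (0, x :: xs)

theorem pvTakeRun_len (t : String) : ∀ xs : List String, (pvTakeRun t xs).2.length ≤ xs.length := by
  intro xs
  induction xs with
  | nil => simp [pvTakeRun]
  | cons x xs ih =>
    simp only [pvTakeRun]
    split
    · exact Nat.le_succ_of_le ih
    · simp

-- run lengths of the groupby decomposition (each group's length = sum(1 for _ in group))
def pvRunLens : List String → List Int
  | [] => []
  | t :: rest => (((pvTakeRun t rest).1 : Int) + 1) :: pvRunLens (pvTakeRun t rest).2
termination_by xs => xs.length
decreasing_by exact Nat.lt_succ_of_le (pvTakeRun_len t rest)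

-- max(lens, default=1)
def max_consecutive_run_py_alt (tokens : List String) : Int :=
  (PySem.List.max? (pvRunLens tokens) (fun x => x)).getD 1

-- ===== PRECONDITION & SPEC =====
def Spec_max_consecutive_run_py (tokens : List String) (out : Int) : Prop := out = max_consecutive_run_py_alt tokens
instance (tokens : List String) (out : Int) : Decidable (Spec_max_consecutive_run_py tokens out) := by unfold Spec_max_consecutive_run_py; infer_instance

-- ===== CLAIM (what is proved, stated in full; the proofs are below) =====
def Claim_equal_max_consecutive_run_py : Prop := ∀ (tokens : List String), Dom_max_consecutive_run_py tokens → Spec_max_consecutive_run_py tokens (max_consecutive_run_py tokens)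

-- ===== LEMMAS AND PROOFS =====

theorem pvRunLens_nil : pvRunLens [] = [] := by rw [pvRunLens]

theorem pvRunLens_cons (t : String) (rest : List String) :
    pvRunLens (t :: rest) = (((pvTakeRun t rest).1 : Int) + 1) :: pvRunLens (pvTakeRun t rest).2 := by
  rw [pvRunLens]

theorem pvTakeRun_cons_self (t : String) (xs : List String) :
    pvTakeRun t (t :: xs) = ((pvTakeRun t xs).1 + 1, (pvTakeRun t xs).2) := by
  simp [pvTakeRun]

theorem pvTakeRun_cons_ne {x t : String} (h : x ≠ t) (xs : List String) :
    pvTakeRun t (x :: xs) = (0, x :: xs) := by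
  simp [pvTakeRun, h]

theorem pvRunLens_ge_one : ∀ (n : Nat) (xs : List String), xs.length ≤ n → ∀ a ∈ pvRunLens xs, 1 ≤ a := by
  intro n
  induction n with
  | zero =>
    intro xs hlen
    have : xs = [] := List.eq_nil_of_length_eq_zero (Nat.le_zero.mp hlen)
    subst this
    simp [pvRunLens_nil]
  | succ n ih =>
    intro xs hlen a ha
    match xs with
    | [] => simp [pvRunLens_nil] at ha
    | t :: rest =>
      rw [pvRunLens_cons] at ha
      rcases List.mem_cons.mp ha with rfl | ha
      · have : (0 : Int) ≤ ((pvTakeRun t rest).1 : Int) := Int.natCast_nonneg _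
        omega
      · have hr : (pvTakeRun t rest).2.length ≤ n :=
          le_trans (pvTakeRun_len t rest) (by simpa using hlen)
        exact ih _ hr a ha

-- core invariant: A's loop from state (m, c, some y) with 1 ≤ c ≤ m equals the running max of m,
-- c + (length of the leading run of y), and the remaining groupby run lengths.
theorem pvLoopA_run : ∀ (n : Nat) (xs : List String), xs.length ≤ n → ∀ (y : String) (m c : Int),
    1 ≤ c → c ≤ m →
    pvLoopA xs m c (some y) =
      List.foldl max m ((c + ((pvTakeRun y xs).1 : Int)) :: pvRunLens (pvTakeRun y xs).2) := by
  intro n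
  induction n with
  | zero =>
    intro xs hlen y m c _ hcm
    have : xs = [] := List.eq_nil_of_length_eq_zero (Nat.le_zero.mp hlen)
    subst this
    simp only [pvLoopA, pvTakeRun, pvRunLens_nil, List.foldl_cons, List.foldl_nil]
    simp only [Nat.cast_zero, add_zero, max_def]
    split_ifs <;> omega
  | succ n ih =>
    intro xs hlen y m c hc hcm
    match xs with
    | [] =>
      simp only [pvLoopA, pvTakeRun, pvRunLens_nil, List.foldl_cons, List.foldl_nil]
      simp only [Nat.cast_zero, add_zero, max_def]
      split_ifs <;> omega
    | x :: rest =>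
      have hrest : rest.length ≤ n := by simpa using hlen
      by_cases hxy : x = y
      · subst hxy
        have hL : pvLoopA (x :: rest) m c (some x) =
            pvLoopA rest (if c + 1 > m then c + 1 else m) (c + 1) (some x) := by
          simp [pvLoopA]
        rw [hL, pvTakeRun_cons_self,
          ih rest hrest x (if c + 1 > m then c + 1 else m) (c + 1) (by omega) (by split <;> omega)]
        simp only [List.foldl_cons]
        congr 1
        push_cast
        simp only [max_def]
        split_ifs <;> omega
      · have hL : pvLoopA (x :: rest) m c (some y) = pvLoopA rest m 1 (some x) := by
          have : (some x == some y) = false := by simpa using hxy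
          simp [pvLoopA, this]
        rw [hL, pvTakeRun_cons_ne hxy, ih rest hrest x m 1 (by omega) (by omega)]
        simp only [pvRunLens_cons, List.foldl_cons]
        congr 1
        push_cast
        simp only [max_def]
        split_ifs <;> omega

theorem foldl_max_one (l : List Int) (h : ∀ a ∈ l, 1 ≤ a) :
    List.foldl max 1 l = (PySem.List.max? l (fun x => x)).getD 1 := by
  match l with
  | [] => simp [PySem.List.max?]
  | a :: t =>
    rw [PySem.List.max?_id_cons]
    simp only [List.foldl_cons, Option.getD_some]
    have h1 : max 1 a = a := by
      have := h a (by simp)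
      omega
    rw [h1]

-- ===== VERDICT (by name: the statement is the Claim_ definition above) =====
theorem max_consecutive_run_py_spec : Claim_equal_max_consecutive_run_py := by
  intro tokens _
  unfold Spec_max_consecutive_run_py max_consecutive_run_py max_consecutive_run_py_alt
  match tokens with
  | [] => simp [pvLoopA, pvRunLens_nil, PySem.List.max?]
  | t :: rest =>
    have hfirst : pvLoopA (t :: rest) 1 1 none = pvLoopA rest 1 1 (some t) := by
      simp [pvLoopA]
    rw [hfirst, pvLoopA_run rest.length rest le_rfl t 1 1 le_rfl le_rfl,
      ← foldl_max_one _ (fun a ha => pvRunLens_ge_one (t :: rest).length (t :: rest) le_rfl a ha)]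
    rw [pvRunLens_cons]
    simp only [List.foldl_cons]
    congr 2
    omega
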